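-- pv_equiv track=rewrite | github.com/NickEinstein1/TUNDA | src/memory/conversation.py | _analyze_emotion_trend
-- ===== SOURCE A (Python) =====
-- from typing import Dict, List, Optional, Any
--
-- def _analyze_emotion_trend(emotions: List[str]) -> str:
--     """Analyze trend in recent emotions."""
--     if len(emotions) < 2:
--         return 'stable'
--
--     # Simple trend analysis
--     positive_emotions = ['happy', 'calm']
--     negative_emotions = ['sad', 'angry', 'anxious']
--
--     positive_count = sum(1 for e in emotions if e in positive_emotions)
--     negative_count = sum(1 for e in emotions if e in negative_emotions)
--
--     if positive_count > negative_count: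
--         return 'improving'
--     elif negative_count > positive_count:
--         return 'declining'
--     else:
--         return 'stable'
-- ===== SOURCE B (Python) =====
-- def _analyze_emotion_trend(emotions):
--     """Analyze trend in recent emotions (single-pass net score)."""
--     if len(emotions) < 2:
--         return 'stable'
--     positive = {'happy', 'calm'}
--     negative = {'sad', 'angry', 'anxious'}
--     score = 0
--     for e in emotions:
--         if e in positive:
--             score += 1
--         elif e in negative:
--             score -= 1
--     if score > 0:
--         return 'improving'
--     if score < 0:
--         return 'declining'
--     return 'stable'
-- ===== Notes on version B (the rewrite author's own statement) =====
-- stated objective: simpler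
-- what changed: Replaces the two separate counting scans and a three-way count comparison by one pass maintaining a single signed net score whose sign is tested.
import Mathlib
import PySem

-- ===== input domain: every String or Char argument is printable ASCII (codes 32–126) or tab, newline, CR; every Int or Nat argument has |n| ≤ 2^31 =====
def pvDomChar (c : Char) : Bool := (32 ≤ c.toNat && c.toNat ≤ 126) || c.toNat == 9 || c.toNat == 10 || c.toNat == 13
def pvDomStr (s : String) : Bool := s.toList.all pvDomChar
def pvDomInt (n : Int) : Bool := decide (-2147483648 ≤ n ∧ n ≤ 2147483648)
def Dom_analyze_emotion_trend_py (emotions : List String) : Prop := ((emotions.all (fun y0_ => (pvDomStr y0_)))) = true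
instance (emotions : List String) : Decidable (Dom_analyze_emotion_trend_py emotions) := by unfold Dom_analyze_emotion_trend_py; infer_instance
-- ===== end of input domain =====

-- B replaces A's two counting scans with one pass keeping a single signed net score (objective: simpler).

-- ===== PORT A =====
def analyze_emotion_trend_py (emotions : List String) : String :=
  if emotions.length < 2 then "stable"
  else
    let positive_emotions : List String := ["happy", "calm"]
    let negative_emotions : List String := ["sad", "angry", "anxious"]
    let positive_count : Int :=
      emotions.foldl (fun acc e => if positive_emotions.contains e then acc + 1 else acc) 0
    let negative_count : Int :=
      emotions.foldl (fun acc e => if negative_emotions.contains e then acc + 1 else acc) 0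
    if positive_count > negative_count then "improving"
    else if negative_count > positive_count then "declining"
    else "stable"

-- ===== PORT B =====
def pvStep (acc : Int) (e : String) : Int :=
  if (PySem.Set.ofList ["happy", "calm"]).contains e then acc + 1
  else if (PySem.Set.ofList ["sad", "angry", "anxious"]).contains e then acc - 1
  else acc

def analyze_emotion_trend_py_alt (emotions : List String) : String :=
  if emotions.length < 2 then "stable"
  else
    let score : Int := emotions.foldl pvStep 0
    if score > 0 then "improving"
    else if score < 0 then "declining"
    else "stable"

-- ===== PRECONDITION & SPEC =====
def Spec_analyze_emotion_trend_py (emotions : List String) (out : String) : Prop := out = analyze_emotion_trend_py_alt emotions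
instance (emotions : List String) (out : String) : Decidable (Spec_analyze_emotion_trend_py emotions out) := by unfold Spec_analyze_emotion_trend_py; infer_instance

-- ===== CLAIM (what is proved, stated in full; the proofs are below) =====
def Claim_equal_analyze_emotion_trend_py : Prop := ∀ (emotions : List String), Dom_analyze_emotion_trend_py emotions → Spec_analyze_emotion_trend_py emotions (analyze_emotion_trend_py emotions)

-- ===== LEMMAS AND PROOFS =====

-- the net score is the positive count minus the negative count
theorem pv_score_eq (emotions : List String) (p n s : Int) (h : s = p - n) :
    emotions.foldl pvStep s =
      emotions.foldl (fun acc e => if (["happy", "calm"] : List String).contains e then acc + 1 else acc) p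
      - emotions.foldl (fun acc e => if (["sad", "angry", "anxious"] : List String).contains e then acc + 1 else acc) n := by
  induction emotions generalizing p n s with
  | nil => simpa using h
  | cons e rest ih =>
    simp only [List.foldl_cons]
    apply ih
    simp [pvStep, PySem.Set.ofList, PySem.Set.add, h]
    by_cases h1 : e = "happy" <;> by_cases h2 : e = "calm" <;>
      by_cases h3 : e = "sad" <;> by_cases h4 : e = "angry" <;> by_cases h5 : e = "anxious" <;>
      simp_all <;> omega

-- ===== VERDICT (by name: the statement is the Claim_ definition above) =====
theorem analyze_emotion_trend_py_spec : Claim_equal_analyze_emotion_trend_py := by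
  intro emotions _
  unfold Spec_analyze_emotion_trend_py analyze_emotion_trend_py analyze_emotion_trend_py_alt
  by_cases hlen : emotions.length < 2
  · simp [hlen]
  · simp only [hlen, if_false]
    have h := pv_score_eq emotions 0 0 0 (by ring)
    rw [h]
    split_ifs <;> first | rfl | omega
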